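-- pv_equiv track=rewrite | github.com/yaeba/binary-search-solutions | solutions/Maximum-Unique-Sublist-Sum.py | solve
-- ===== SOURCE A (Python) =====
-- import itertools as it
--
-- def solve(nums):
--     prefix_sums = list(it.accumulate(nums, initial=0))
--     last_seen = {}
--     res, start = 0, 0
--
--     for idx, num in enumerate(nums):
--         if num in last_seen:
--             start = max(start, last_seen[num] + 1)
--         last_seen[num] = idx
--         res = max(res, prefix_sums[idx + 1] - prefix_sums[start])
--
--     return res
-- ===== SOURCE B (Python) =====
-- import itertools as it
--
-- def solve(nums):
--     prefix = list(it.accumulate(nums, initial=0))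
--     seen = set()
--     left = 0
--     res = 0
--     for idx, num in enumerate(nums):
--         while num in seen:
--             seen.discard(nums[left])
--             left += 1
--         seen.add(num)
--         res = max(res, prefix[idx + 1] - prefix[left])
--     return res
-- ===== Notes on version B (the rewrite author's own statement) =====
-- stated objective: alternative
-- what changed: Replaces the last-seen-index dict and the max(start, last_seen[num]+1) positional jump with a classic sliding window: a membership set plus a left pointer that shrinks incrementally while the new element is still in the window.
import Mathlib
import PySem

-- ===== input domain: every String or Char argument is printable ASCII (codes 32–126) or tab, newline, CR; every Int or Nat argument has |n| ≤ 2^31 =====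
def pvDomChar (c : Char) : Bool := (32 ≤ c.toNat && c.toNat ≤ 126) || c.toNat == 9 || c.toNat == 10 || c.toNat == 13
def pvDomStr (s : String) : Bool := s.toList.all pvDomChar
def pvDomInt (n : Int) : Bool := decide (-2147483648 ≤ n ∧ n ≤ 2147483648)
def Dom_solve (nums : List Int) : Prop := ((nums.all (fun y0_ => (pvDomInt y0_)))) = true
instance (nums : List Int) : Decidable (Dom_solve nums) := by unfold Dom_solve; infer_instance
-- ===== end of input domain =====

-- B replaces A's last-seen-index dict and positional start jump by a sliding window
-- (membership set + incrementally advancing left pointer); same results.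

-- ===== PORT A =====
-- the for-loop of A: state (last_seen, res, start); prefix_ = list(it.accumulate(nums, initial=0))
def solveAux (prefix_ : List Int) : List (Int × Int) → PySem.Dict Int Int → Int → Int → Int
  | [], _, res, _ => res
  | (idx, num) :: rest, last_seen, res, start =>
    -- 'if num in last_seen: start = max(start, last_seen[num] + 1)'; the getD default is
    -- unreachable because the lookup is guarded by contains (Python would raise otherwise)
    let start' := if last_seen.contains num then max start (last_seen.getD num 0 + 1) else start
    let last_seen' := last_seen.insert num idx
    let res' := max res (PySem.List.pyGetD prefix_ (idx + 1) 0 - PySem.List.pyGetD prefix_ start' 0)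
    solveAux prefix_ rest last_seen' res' start'

def solve (nums : List Int) : Int :=
  solveAux (List.scanl (· + ·) 0 nums) (PySem.List.enumerate nums 0) PySem.Dict.empty 0 0

-- ===== PORT B =====
-- 'while num in seen: seen.discard(nums[left]); left += 1' — fuel |seen| bounds the loop,
-- since every pass discards an element currently in seen
def shrinkB (nums : List Int) (num : Int) : Nat → PySem.Set Int → Int → PySem.Set Int × Int
  | 0, seen, left => (seen, left)
  | fuel + 1, seen, left =>
    if PySem.Set.contains seen num then
      shrinkB nums num fuel (PySem.Set.discard seen (PySem.List.pyGetD nums left 0)) (left + 1)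
    else (seen, left)

def solveAltAux (nums prefix_ : List Int) : List (Int × Int) → PySem.Set Int → Int → Int → Int
  | [], _, _, res => res
  | (idx, num) :: rest, seen, left, res =>
    let sl := shrinkB nums num seen.length seen left
    let seen' := PySem.Set.add sl.1 num
    let res' := max res (PySem.List.pyGetD prefix_ (idx + 1) 0 - PySem.List.pyGetD prefix_ sl.2 0)
    solveAltAux nums prefix_ rest seen' sl.2 res'

def solve_alt (nums : List Int) : Int :=
  solveAltAux nums (List.scanl (· + ·) 0 nums) (PySem.List.enumerate nums 0) PySem.Set.empty 0 0

-- ===== PRECONDITION & SPEC =====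
def Spec_solve (nums : List Int) (out : Int) : Prop := out = solve_alt nums
instance (nums : List Int) (out : Int) : Decidable (Spec_solve nums out) := by unfold Spec_solve; infer_instance

-- ===== CLAIM (what is proved, stated in full; the proofs are below) =====
def Claim_equal_solve : Prop := ∀ (nums : List Int), Dom_solve nums → Spec_solve nums (solve nums)

-- ===== LEMMAS AND PROOFS =====

-- index of the LAST occurrence of v in l (what A's dict stores for each key)
def lastIdx? (l : List Int) (v : Int) : Option Nat :=
  match l with
  | [] => none
  | x :: xs =>
    match lastIdx? xs v with
    | some j => some (j + 1)
    | none => if x = v then some 0 else none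

lemma lastIdx?_eq_none_iff (l : List Int) (v : Int) : lastIdx? l v = none ↔ v ∉ l := by
  induction l with
  | nil => simp [lastIdx?]
  | cons x xs ih =>
    rw [lastIdx?]
    cases h : lastIdx? xs v with
    | some j =>
      have hv : v ∈ xs := by
        by_contra hv
        have := ih.mpr hv
        rw [this] at h; simp at h
      simp [hv]
    | none =>
      have hv : v ∉ xs := ih.mp h
      by_cases hx : x = v
      · simp [hx, hv]
      · have hvx : v ≠ x := fun e => hx e.symm
        simp [hx, hv, hvx]

lemma lastIdx?_append_singleton (l : List Int) (v w : Int) :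
    lastIdx? (l ++ [w]) v = if v = w then some l.length else lastIdx? l v := by
  induction l with
  | nil => by_cases h : v = w <;> simp [lastIdx?, h, eq_comm]
  | cons x xs ih =>
    simp only [List.cons_append, lastIdx?, ih]
    by_cases h : v = w
    · simp [h]
    · simp [h]

lemma lastIdx?_of_nodup (w : List Int) (v : Int) (hnd : w.Nodup) (hm : v ∈ w) :
    lastIdx? w v = some (List.idxOf v w) := by
  induction w with
  | nil => simp at hm
  | cons x xs ih =>
    rcases List.mem_cons.mp hm with h | h
    · subst h
      have hx : v ∉ xs := (List.nodup_cons.mp hnd).1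
      have hnone : lastIdx? xs v = none := (lastIdx?_eq_none_iff xs v).mpr hx
      simp [lastIdx?, hnone, List.idxOf_cons_self]
    · have hne : x ≠ v := by
        rintro rfl; exact (List.nodup_cons.mp hnd).1 h
      have hsome := ih (List.nodup_cons.mp hnd).2 h
      simp [lastIdx?, hsome, List.idxOf_cons_ne _ hne]

lemma lastIdx?_window (taken w : List Int) (v : Int) (left : Nat)
    (h : taken.drop left = w) (hnd : w.Nodup) (hm : v ∈ w) :
    lastIdx? taken v = some (left + List.idxOf v w) := by
  induction taken generalizing left with
  | nil =>
    simp only [List.drop_nil] at h; subst h; simp at hm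
  | cons x xs ih =>
    cases left with
    | zero =>
      simp only [List.drop_zero] at h; subst h
      simpa using lastIdx?_of_nodup _ _ hnd hm
    | succ l =>
      simp only [List.drop_succ_cons] at h
      have hx := ih l h
      rw [lastIdx?, hx]
      simp only [Option.some.injEq]
      omega

lemma lastIdx?_lt_of_not_window (taken w : List Int) (v : Int) (left j : Nat)
    (h : taken.drop left = w) (hm : v ∉ w) (hj : lastIdx? taken v = some j) :
    j < left := by
  induction taken generalizing left j with
  | nil => simp [lastIdx?] at hj
  | cons x xs ih =>
    cases left with
    | zero =>
      simp only [List.drop_zero] at h; subst h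
      have := (lastIdx?_eq_none_iff _ v).mpr hm
      rw [this] at hj; simp at hj
    | succ l =>
      simp only [List.drop_succ_cons] at h
      rw [lastIdx?] at hj
      cases hlast : lastIdx? xs v with
      | some j' =>
        rw [hlast] at hj
        simp only [Option.some.injEq] at hj
        have := ih l j' h hlast
        omega
      | none =>
        rw [hlast] at hj
        by_cases hxv : x = v
        · rw [if_pos hxv] at hj
          simp only [Option.some.injEq] at hj
          omega
        · rw [if_neg hxv] at hj
          simp at hj

lemma shrink_of_not_mem (nums : List Int) (num : Int) (fuel : Nat)
    (seen : PySem.Set Int) (left : Int) (h : num ∉ seen) :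
    shrinkB nums num fuel seen left = (seen, left) := by
  cases fuel with
  | zero => rfl
  | succ f =>
    simp [shrinkB, h]

lemma discard_cons_self (x : Int) (w : List Int) (hx : x ∉ w) :
    PySem.Set.discard (x :: w) x = w := by
  have hall : ∀ y ∈ w, (!(y == x)) = true := by
    intro y hy
    have : y ≠ x := fun e => hx (e ▸ hy)
    simp [this]
  simp [PySem.Set.discard, List.filter_eq_self.mpr hall]

lemma head_of_prefix_drop (nums w : List Int) (x : Int) (left : Nat)
    (hpre : (x :: w) <+: nums.drop left) :
    PySem.List.pyGetD nums (left : Int) 0 = x := by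
  obtain ⟨t, ht⟩ := hpre
  have hsome : nums[left]? = some x := by
    have h0 : (nums.drop left)[0]? = some x := by rw [← ht]; rfl
    rw [List.getElem?_drop] at h0
    simpa using h0
  simp [PySem.List.pyGetD_natCast, List.getD, hsome]

lemma shrink_of_mem (w : List Int) (nums : List Int) (num : Int) (left fuel : Nat)
    (hpre : w <+: nums.drop left) (hnd : w.Nodup) (hm : num ∈ w) (hf : w.length ≤ fuel) :
    shrinkB nums num fuel w (left : Int)
      = (w.drop (List.idxOf num w + 1), (left : Int) + (List.idxOf num w + 1)) := by
  induction w generalizing left fuel with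
  | nil => simp at hm
  | cons x w' ih =>
    obtain ⟨f, rfl⟩ : ∃ f, fuel = f + 1 := ⟨fuel - 1, by simp at hf; omega⟩
    have hcont : PySem.Set.contains (x :: w') num = true := (PySem.Set.contains_iff _ _).mpr hm
    have hget : PySem.List.pyGetD nums (left : Int) 0 = x := head_of_prefix_drop nums w' x left hpre
    have hxw : x ∉ w' := (List.nodup_cons.mp hnd).1
    rw [shrinkB]
    simp only [hcont, if_true, hget, discard_cons_self x w' hxw]
    by_cases hnx : num = x
    · subst hnx
      have hnw' : num ∉ w' := hxw
      rw [shrink_of_not_mem nums num f w' _ hnw']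
      simp [List.idxOf_cons_self]
    · have hm' : num ∈ w' := (List.mem_cons.mp hm).resolve_left hnx
      have hpre' : w' <+: nums.drop (left + 1) := by
        obtain ⟨t, ht⟩ := hpre
        refine ⟨t, ?_⟩
        have : nums.drop (left + 1) = (nums.drop left).drop 1 := by
          rw [List.drop_drop]
        rw [this, ← ht]
        rfl
      have hrec := ih (left + 1) f hpre' (List.nodup_cons.mp hnd).2 hm' (by simp at hf; omega)
      have hcast : ((left : Int) + 1) = (((left + 1 : Nat)) : Int) := by push_cast; ring
      rw [hcast, hrec, List.idxOf_cons_ne _ (Ne.symm hnx)]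
      simp only [Nat.succ_eq_add_one, List.drop_succ_cons, Prod.mk.injEq]
      refine ⟨by trivial, by push_cast; ring⟩

lemma not_mem_drop_idxOf_succ (w : List Int) (num : Int) (hnd : w.Nodup) (hm : num ∈ w) :
    num ∉ w.drop (List.idxOf num w + 1) := by
  intro hmem
  have hp : List.idxOf num w < w.length := List.idxOf_lt_length_of_mem hm
  obtain ⟨m, hmlt, hget⟩ := List.getElem_of_mem hmem
  rw [List.getElem_drop] at hget
  have hgp : w[List.idxOf num w] = num := List.getElem_idxOf hp
  have hlen : List.idxOf num w + 1 + m < w.length := by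
    have := hmlt; simp [List.length_drop] at this; omega
  have : List.idxOf num w = List.idxOf num w + 1 + m :=
    (hnd.getElem_inj_iff).mp (by rw [hgp, hget])
  omega

-- the bisimulation: A's (last_seen, start) and B's (seen, left) stay in lockstep
lemma loop_eq (nums prefix_ : List Int) :
    ∀ (vs taken : List Int) (left : Nat) (d : PySem.Dict Int Int) (seen : PySem.Set Int) (res : Int),
    nums = taken ++ vs →
    left ≤ taken.length →
    seen = taken.drop left →
    (taken.drop left).Nodup →
    (∀ v, d.get? v = (lastIdx? taken v).map (fun j => (j : Int))) →
    solveAux prefix_ (PySem.List.enumerate vs (taken.length : Int)) d res (left : Int)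
      = solveAltAux nums prefix_ (PySem.List.enumerate vs (taken.length : Int)) seen (left : Int) res := by
  intro vs
  induction vs with
  | nil =>
    intro taken left d seen res _ _ _ _ _
    simp [PySem.List.enumerate_nil, solveAux, solveAltAux]
  | cons num vs ih =>
    intro taken left d seen res hnums hle hseen hnd hd
    subst hseen
    simp only [PySem.List.enumerate_cons, solveAux, solveAltAux]
    have hlen1 : ((taken ++ [num]).length : Int) = (taken.length : Int) + 1 := by
      simp
    have hnums' : nums = (taken ++ [num]) ++ vs := by
      rw [hnums, List.append_assoc]; rfl
    have hd' : ∀ v, (d.insert num (taken.length : Int)).get? v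
        = (lastIdx? (taken ++ [num]) v).map (fun j => (j : Int)) := by
      intro v
      rw [PySem.Dict.get?_insert, lastIdx?_append_singleton, hd v]
      by_cases hv : v = num <;> simp [hv]
    have hpre : taken.drop left <+: nums.drop left :=
      ⟨num :: vs, by rw [hnums, List.drop_append_of_le_length hle]⟩
    by_cases hmem : num ∈ taken.drop left
    · -- the new element is in the current window: both pointers jump past its occurrence
      set p := List.idxOf num (taken.drop left) with hp
      have hplt : p < (taken.drop left).length := List.idxOf_lt_length_of_mem hmem
      have hlenw : (taken.drop left).length = taken.length - left := List.length_drop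
      have hshr := shrink_of_mem (taken.drop left) nums num left (taken.drop left).length
        hpre hnd hmem le_rfl
      rw [← hp] at hshr
      have hli := lastIdx?_window taken (taken.drop left) num left rfl hnd hmem
      have hcont : d.contains num = true := by
        rw [PySem.Dict.contains_eq_isSome_get?, hd num, hli]; rfl
      have hgd : d.getD num 0 = ((left + p : Nat) : Int) := by
        rw [PySem.Dict.getD_eq_get?_getD, hd num, hli, ← hp]; simp
      have hstart : (if d.contains num = true then max (left : Int) (d.getD num 0 + 1)
          else (left : Int)) = ((left + p + 1 : Nat) : Int) := by
        rw [hcont, if_pos rfl, hgd]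
        push_cast
        omega
      have hle' : left + p + 1 ≤ (taken ++ [num]).length := by
        simp only [List.length_append, List.length_singleton]
        omega
      have hdropeq : (taken ++ [num]).drop (left + p + 1)
          = (taken.drop left).drop (p + 1) ++ [num] := by
        rw [List.drop_append_of_le_length (by omega), List.drop_drop, Nat.add_assoc]
      have hnotmem : num ∉ (taken.drop left).drop (p + 1) :=
        not_mem_drop_idxOf_succ (taken.drop left) num hnd hmem
      have hseen' : PySem.Set.add ((taken.drop left).drop (p + 1)) num
          = (taken ++ [num]).drop (left + p + 1) := by
        rw [PySem.Set.add_of_not_mem hnotmem, hdropeq]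
      have hnd' : ((taken ++ [num]).drop (left + p + 1)).Nodup := by
        rw [hdropeq]
        have hdnd : ((taken.drop left).drop (p + 1)).Nodup :=
          hnd.sublist (List.drop_sublist _ _)
        simp only [List.nodup_append, List.nodup_singleton]
        exact ⟨hdnd, trivial, by intro a ha b hb e; rw [List.mem_singleton] at hb; subst hb; subst e; exact hnotmem ha⟩
      have hrec := ih (taken ++ [num]) (left + p + 1) (d.insert num (taken.length : Int))
        ((taken ++ [num]).drop (left + p + 1)) (max res
          (PySem.List.pyGetD prefix_ ((taken.length : Int) + 1) 0
            - PySem.List.pyGetD prefix_ ((left + p + 1 : Nat) : Int) 0))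
        hnums' hle' rfl hnd' hd'
      rw [hshr, hstart]
      rw [hlen1] at hrec
      rw [← hseen'] at hrec
      convert hrec using 3
    · -- the new element is not in the window: neither pointer moves
      have hshrn := shrink_of_not_mem nums num (taken.drop left).length (taken.drop left)
        (left : Int) hmem
      have hstart : (if d.contains num = true then max (left : Int) (d.getD num 0 + 1)
          else (left : Int)) = (left : Int) := by
        cases hc : d.contains num with
        | false => simp
        | true =>
          rw [if_pos rfl]
          have hiss : (d.get? num).isSome := by
            rw [← PySem.Dict.contains_eq_isSome_get?, hc]
          cases hli : lastIdx? taken num with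
          | none => rw [hd num, hli] at hiss; simp at hiss
          | some j =>
            have hjlt : j < left := lastIdx?_lt_of_not_window taken (taken.drop left)
              num left j rfl hmem hli
            have hgd : d.getD num 0 = (j : Int) := by
              rw [PySem.Dict.getD_eq_get?_getD, hd num, hli]; simp
            rw [hgd]
            have : (j : Int) + 1 ≤ (left : Int) := by omega
            omega
      have hle' : left ≤ (taken ++ [num]).length := by
        simp only [List.length_append, List.length_singleton]; omega
      have hdropeq : (taken ++ [num]).drop left = taken.drop left ++ [num] :=
        List.drop_append_of_le_length hle
      have hseen' : PySem.Set.add (taken.drop left) num = (taken ++ [num]).drop left := by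
        rw [PySem.Set.add_of_not_mem hmem, hdropeq]
      have hnd' : ((taken ++ [num]).drop left).Nodup := by
        rw [hdropeq]
        simp only [List.nodup_append, List.nodup_singleton]
        exact ⟨hnd, trivial, by intro a ha b hb e; rw [List.mem_singleton] at hb; subst hb; subst e; exact hmem ha⟩
      have hrec := ih (taken ++ [num]) left (d.insert num (taken.length : Int))
        ((taken ++ [num]).drop left) (max res
          (PySem.List.pyGetD prefix_ ((taken.length : Int) + 1) 0
            - PySem.List.pyGetD prefix_ (left : Int) 0))
        hnums' hle' rfl hnd' hd'
      rw [hshrn, hstart]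
      rw [hlen1] at hrec
      rw [← hseen'] at hrec
      exact hrec

-- ===== VERDICT (by name: the statement is the Claim_ definition above) =====
theorem solve_spec : Claim_equal_solve := by
  intro nums _
  unfold Spec_solve solve solve_alt
  have h := loop_eq nums (List.scanl (· + ·) 0 nums) nums [] 0 PySem.Dict.empty PySem.Set.empty 0
    (by simp) (by simp) (by simp [PySem.Set.empty]) (by simp) (by intro v; simp [lastIdx?])
  simpa using h
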